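-- pv_equiv track=rewrite | github.com/natimmansilla/TP5_AED | main.py | calcular_cantidad_palabras
-- ===== SOURCE A (Python) =====
-- def calcular_cantidad_palabras(cadena):
--     # inicializador de contadores, acumuladores y banderas no reiniciables
--     cp = cp1 = 0
--
--     # inicializador de contadores, acumuladores y banderas reiniciables
--     ccp = 0
--     b_start_mayus = False
--     c_tiene_t = c_tiene_s = 0
--
--     for car in cadena:
--         if car != " " and car != ".":  # analizo caracteres
--             ccp += 1
--
--             if ccp == 1:
--                 if es_mayuscula(car):
--                     b_start_mayus = True
--
--             if car.lower() == "t":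
--                 c_tiene_t += 1
--
--             if car.lower() == "s":
--                 c_tiene_s += 1
--
--         # Analizo palabras
--         else:
--             if ccp > 0:
--                 cp += 1
--                 if b_start_mayus and (c_tiene_t > 0) and (c_tiene_s > 0):
--                     cp1 += 1
--
--             # reinicio de contadores, acumuladores y banderas
--             ccp = 0
--             b_start_mayus = False
--             c_tiene_t = c_tiene_s = 0
--
--     return cp1
--
-- def es_mayuscula(c):
--     return "A" <= c <= "Z" or c == "Ñ"
-- ===== SOURCE B (Python) =====
-- def es_mayuscula(c):
--     return "A" <= c <= "Z" or c == "Ñ"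
--
-- def calcular_cantidad_palabras(cadena):
--     # Split into delimiter-terminated segments; the final segment (after the
--     # last delimiter, or the whole string if there is none) is never closed
--     # by a delimiter, so it is dropped, exactly as the original.
--     partes = cadena.replace(".", " ").split(" ")
--     cuenta = 0
--     for palabra in partes[:-1]:
--         if palabra and es_mayuscula(palabra[0]) and "t" in palabra.lower() and "s" in palabra.lower():
--             cuenta += 1
--     return cuenta
-- ===== Notes on version B (the rewrite author's own statement) =====
-- stated objective: idiomatic
-- what changed: A scans characters one by one maintaining per-word counters and flags (length, uppercase flag, t/s occurrence counts); B instead replaces periods by spaces, splits the string into words, drops the unterminated last piece, and counts the words passing the whole-word test with substring membership.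
import Mathlib
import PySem

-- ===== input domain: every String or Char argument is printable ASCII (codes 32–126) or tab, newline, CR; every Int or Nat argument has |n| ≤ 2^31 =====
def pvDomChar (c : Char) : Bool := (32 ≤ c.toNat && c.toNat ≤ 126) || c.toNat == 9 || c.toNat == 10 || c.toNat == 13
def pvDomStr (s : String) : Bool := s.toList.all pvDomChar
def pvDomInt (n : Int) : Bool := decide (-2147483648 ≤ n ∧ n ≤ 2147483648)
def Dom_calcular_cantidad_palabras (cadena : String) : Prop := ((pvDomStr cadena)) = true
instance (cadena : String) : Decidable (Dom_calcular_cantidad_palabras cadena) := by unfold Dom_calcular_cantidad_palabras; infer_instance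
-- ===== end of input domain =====

-- B replaces A's per-character counter machinery by an idiomatic split of the string into
-- delimiter-terminated words (dropping the unterminated trailing word, as A does) and a
-- count of the words passing the completed-word test; a timing run measured B faster
-- (C-implemented replace/split vs a per-character Python loop).


-- ===== PORT A =====
def es_mayuscula (c : Char) : Bool := decide ('A' ≤ c ∧ c ≤ 'Z') || c == 'Ñ'

-- state (cp, cp1, ccp, b_start_mayus, c_tiene_t, c_tiene_s)
def pvStepA (st : Int × Int × Int × Bool × Int × Int) (car : Char) : Int × Int × Int × Bool × Int × Int :=
  match st with
  | (cp, cp1, ccp, b, t, s) =>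
    if car ≠ ' ' ∧ car ≠ '.' then
      let ccp := ccp + 1
      let b := if ccp = 1 then (if es_mayuscula car then true else b) else b
      let t := if PySem.Chars.lower [car] = ['t'] then t + 1 else t
      let s := if PySem.Chars.lower [car] = ['s'] then s + 1 else s
      (cp, cp1, ccp, b, t, s)
    else
      let cp := if ccp > 0 then cp + 1 else cp
      let cp1 := if ccp > 0 ∧ b = true ∧ t > 0 ∧ s > 0 then cp1 + 1 else cp1
      (cp, cp1, 0, false, 0, 0)

def calcular_cantidad_palabras (cadena : String) : Int :=
  (cadena.toList.foldl pvStepA (0, 0, 0, false, 0, 0)).2.1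

-- ===== PORT B =====
def pvGood (palabra : List Char) : Bool :=
  !palabra.isEmpty && es_mayuscula (palabra.headD ' ')
    && PySem.Chars.isIn ['t'] (PySem.Chars.lower palabra)
    && PySem.Chars.isIn ['s'] (PySem.Chars.lower palabra)

def calcular_cantidad_palabras_alt (cadena : String) : Int :=
  let partes := PySem.Chars.splitOn (PySem.Chars.replace cadena.toList ['.'] [' ']) [' ']
  (PySem.List.slice partes none (some (-1))).foldl
    (fun cuenta palabra => if pvGood palabra then cuenta + 1 else cuenta) 0

-- ===== PRECONDITION & SPEC =====
def Spec_calcular_cantidad_palabras (cadena : String) (out : Int) : Prop := out = calcular_cantidad_palabras_alt cadena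
instance (cadena : String) (out : Int) : Decidable (Spec_calcular_cantidad_palabras cadena out) := by unfold Spec_calcular_cantidad_palabras; infer_instance

-- ===== CLAIM (what is proved, stated in full; the proofs are below) =====
def Claim_equal_calcular_cantidad_palabras : Prop := ∀ (cadena : String), Dom_calcular_cantidad_palabras cadena → Spec_calcular_cantidad_palabras cadena (calcular_cantidad_palabras cadena)

-- ===== LEMMAS AND PROOFS =====

-- '.' → ' ' substitution on one character
def pvSub (c : Char) : Char := if c = '.' then ' ' else c

-- the ' '-terminated segments of a char list, current partial word w in front;
-- the last element is the unterminated trailing segment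
def pvWords (w : List Char) : List Char → List (List Char)
  | [] => [w]
  | c :: rest => if c = ' ' then w :: pvWords [] rest else pvWords (w ++ [c]) rest

def pvFlag (w : List Char) : Bool :=
  match w with
  | [] => false
  | c :: _ => es_mayuscula c

lemma pvWords_ne_nil (w cs : List Char) : pvWords w cs ≠ [] := by
  induction cs generalizing w with
  | nil => simp [pvWords]
  | cons c rest ih => simp only [pvWords]; split <;> simp [ih]

lemma pvReplace_go_map (cs acc : List Char) (fuel : Nat) (h : cs.length ≤ fuel) :
    PySem.Chars.replace.go ['.'] [' '] fuel cs acc = acc.reverse ++ cs.map pvSub := by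
  induction cs generalizing acc fuel with
  | nil => cases fuel <;> simp [PySem.Chars.replace.go]
  | cons c rest ih =>
    cases fuel with
    | zero => simp at h
    | succ n =>
      simp only [PySem.Chars.replace.go]
      by_cases hc : c = '.'
      · subst hc
        simp only [List.isPrefixOf, beq_self_eq_true, Bool.true_and, List.isPrefixOf_nil_left,
          if_true, List.length_cons, List.length_nil, List.drop_succ_cons, List.drop_zero]
        rw [ih _ _ (by simpa using Nat.le_of_succ_le_succ h)]
        simp [pvSub]
      · rw [show List.isPrefixOf ['.'] (c :: rest) = false by
          simp [List.isPrefixOf]; exact fun h => hc h.symm]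
        simp only [Bool.false_eq_true, if_false, List.tail_cons]
        rw [ih _ _ (by simpa using Nat.le_of_succ_le_succ h)]
        simp [pvSub, hc]

lemma pvReplace_eq (cs : List Char) :
    PySem.Chars.replace cs ['.'] [' '] = cs.map pvSub := by
  simp [PySem.Chars.replace, pvReplace_go_map cs [] cs.length (le_refl _)]

lemma pvSplitOn_go_words (cs cur : List Char) (acc : List (List Char)) (fuel : Nat)
    (h : cs.length ≤ fuel) :
    PySem.Chars.splitOn.go [' '] fuel cs cur acc = acc.reverse ++ pvWords cur.reverse cs := by
  induction cs generalizing cur acc fuel with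
  | nil => cases fuel <;> simp [PySem.Chars.splitOn.go, pvWords]
  | cons c rest ih =>
    cases fuel with
    | zero => simp at h
    | succ n =>
      simp only [PySem.Chars.splitOn.go]
      by_cases hc : c = ' '
      · subst hc
        simp only [List.isPrefixOf, beq_self_eq_true, Bool.true_and, List.isPrefixOf_nil_left,
          if_true, List.length_cons, List.length_nil, List.drop_succ_cons, List.drop_zero]
        rw [ih _ _ _ (by simpa using Nat.le_of_succ_le_succ h)]
        simp [pvWords]
      · rw [show List.isPrefixOf [' '] (c :: rest) = false by
          simp [List.isPrefixOf]; exact fun h => hc h.symm]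
        simp only [Bool.false_eq_true, if_false]
        rw [ih _ _ _ (by simpa using Nat.le_of_succ_le_succ h)]
        simp [pvWords, hc]

lemma pvSplitOn_eq (cs : List Char) :
    PySem.Chars.splitOn cs [' '] = pvWords [] cs := by
  simpa using pvSplitOn_go_words cs [] [] (cs.length + 1) (by omega)

lemma pvMem_lower_iff (x : Char) (w : List Char) :
    PySem.Chars.isIn [x] (PySem.Chars.lower w) = true ↔
      0 < w.countP (fun c => PySem.Chars.lower [c] = [x]) := by
  rw [PySem.Chars.isIn_iff_infix, List.singleton_infix_iff, List.countP_pos_iff]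
  simp [PySem.Chars.lower]

lemma pvGood_iff (w : List Char) :
    pvGood w = true ↔
      ((w.length : Int) > 0 ∧ pvFlag w = true ∧
        ((w.countP (fun c => PySem.Chars.lower [c] = ['t']) : Int) > 0) ∧
        ((w.countP (fun c => PySem.Chars.lower [c] = ['s']) : Int) > 0)) := by
  cases w with
  | nil => simp [pvGood, pvFlag]
  | cons c rest =>
    have h1 : ((c :: rest).length : Int) > 0 := by push_cast [List.length_cons]; omega
    simp [pvGood, pvFlag, pvMem_lower_iff, h1, Int.natCast_pos, and_assoc]

lemma pvFlag_append (w : List Char) (c : Char) :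
    (if (w.length : Int) + 1 = 1 then (if es_mayuscula c then true else pvFlag w) else pvFlag w)
      = pvFlag (w ++ [c]) := by
  cases w with
  | nil => cases h : es_mayuscula c <;> simp [pvFlag, h]
  | cons a rest =>
    rw [if_neg (show ¬((a :: rest).length : Int) + 1 = 1 by push_cast [List.length_cons]; omega)]
    simp [pvFlag]

lemma pvCount_append (w : List Char) (c : Char) (p : Char → Prop) [DecidablePred p] :
    (if p c then ((w.countP fun x => p x) : Int) + 1 else ((w.countP fun x => p x) : Int))
      = (((w ++ [c]).countP fun x => p x) : Int) := by
  rw [List.countP_append]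
  by_cases hp : p c <;> simp [hp]

lemma pvMain (cs : List Char) (cp cp1 : Int) (w : List Char) :
    (cs.foldl pvStepA (cp, cp1, (w.length : Int), pvFlag w,
        (w.countP (fun c => PySem.Chars.lower [c] = ['t']) : Int),
        (w.countP (fun c => PySem.Chars.lower [c] = ['s']) : Int))).2.1
      = cp1 + (((pvWords w (cs.map pvSub)).dropLast.countP pvGood : Nat) : Int) := by
  induction cs generalizing cp cp1 w with
  | nil => simp [pvWords]
  | cons c rest ih =>
    simp only [List.foldl_cons, List.map_cons]
    by_cases hd : c ≠ ' ' ∧ c ≠ '.'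
    · rw [show pvStepA (cp, cp1, (w.length : Int), pvFlag w,
          (w.countP (fun c => PySem.Chars.lower [c] = ['t']) : Int),
          (w.countP (fun c => PySem.Chars.lower [c] = ['s']) : Int)) c
        = (cp, cp1, ((w ++ [c]).length : Int), pvFlag (w ++ [c]),
          ((w ++ [c]).countP (fun c => PySem.Chars.lower [c] = ['t']) : Int),
          ((w ++ [c]).countP (fun c => PySem.Chars.lower [c] = ['s']) : Int)) by
          simp only [pvStepA, if_pos hd, pvFlag_append,
            pvCount_append w c (fun x => PySem.Chars.lower [x] = ['t']),
            pvCount_append w c (fun x => PySem.Chars.lower [x] = ['s'])]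
          simp]
      rw [ih]
      have hsub : pvSub c = c := by simp [pvSub, hd.2]
      rw [hsub, show pvWords w (c :: rest.map pvSub) = pvWords (w ++ [c]) (rest.map pvSub) by
        simp [pvWords, hd.1]]
    · have hsub : pvSub c = ' ' := by
        by_cases hc : c = '.' <;> simp [pvSub, hc] at hd ⊢ <;> tauto
      rw [hsub, show pvWords w (' ' :: rest.map pvSub) = w :: pvWords [] (rest.map pvSub) by
        simp [pvWords]]
      rw [List.dropLast_cons_of_ne_nil (pvWords_ne_nil [] (rest.map pvSub))]
      rw [show pvStepA (cp, cp1, (w.length : Int), pvFlag w,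
          (w.countP (fun c => PySem.Chars.lower [c] = ['t']) : Int),
          (w.countP (fun c => PySem.Chars.lower [c] = ['s']) : Int)) c
        = ((if (w.length : Int) > 0 then cp + 1 else cp),
           (if pvGood w then cp1 + 1 else cp1), 0, false, 0, 0) by
          simp only [pvStepA, if_neg hd]
          congr 2
          by_cases hg : pvGood w = true
          · rw [if_pos ((pvGood_iff w).mp hg), if_pos hg]
          · rw [if_neg (fun hh => hg ((pvGood_iff w).mpr hh)), if_neg (by simp [hg])]]
      have h := ih (if (w.length : Int) > 0 then cp + 1 else cp)
        (if pvGood w then cp1 + 1 else cp1) []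
      simp only [List.length_nil, List.countP_nil, Nat.cast_zero] at h
      rw [show pvFlag [] = false from rfl] at h
      rw [h, List.countP_cons]
      by_cases hg : pvGood w = true <;> simp [hg] <;> ring

-- ===== VERDICT (by name: the statement is the Claim_ definition above) =====
theorem calcular_cantidad_palabras_spec : Claim_equal_calcular_cantidad_palabras := by
  intro cadena _
  unfold Spec_calcular_cantidad_palabras calcular_cantidad_palabras calcular_cantidad_palabras_alt
  simp only [pvReplace_eq, pvSplitOn_eq, PySem.List.slice_to_neg_one,
    PySem.List.foldl_count_if pvGood]
  simpa using pvMain cadena.toList 0 0 []
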